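-- pv_equiv track=rewrite | github.com/DancingOnAir/LeetcodePythonSolution | two_pointers/3814_maximum_capacity_within_budget.py | maxCapacity
-- ===== SOURCE A (Python) =====
-- from typing import List
--
-- def maxCapacity(costs: List[int], capacity: List[int], budget: int) -> int:
--     a = [(cost, cap) for cost, cap in zip(costs, capacity) if cost < budget]
--     a.sort(key=lambda x: x[0])
--
--     stk = [(0, 0)]
--     res = 0
--     for cost, cap in a:
--         while cost + stk[-1][0] >= budget:
--             stk.pop()
--         res = max(res, stk[-1][1] + cap)
--         if cap > stk[-1][1]:
--             stk.append((cost, cap))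
--     return res
-- ===== SOURCE B (Python) =====
-- def maxCapacity(costs, capacity, budget):
--     # Sort affordable items by cost; precompute prefix maxima of capacity and
--     # sweep a backward-moving partner pointer k (two pointers, no stack).
--     a = sorted(((c, p) for c, p in zip(costs, capacity) if c < budget),
--                key=lambda x: x[0])
--     n = len(a)
--     pm = [0]
--     for _, p in a:
--         pm.append(pm[-1] if pm[-1] >= p else p)
--     res = 0
--     k = n
--     for j, (cj, pj) in enumerate(a):
--         while k > 0 and a[k - 1][0] + cj >= budget:
--             k -= 1
--         res = max(res, pj + pm[k if k < j else j])
--     return res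
-- ===== Notes on version B (the rewrite author's own statement) =====
-- stated objective: alternative
-- what changed: Replaces the monotonic stack with a precomputed prefix-maximum-capacity array queried through a backward-moving two-pointer partner count.
import Mathlib
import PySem

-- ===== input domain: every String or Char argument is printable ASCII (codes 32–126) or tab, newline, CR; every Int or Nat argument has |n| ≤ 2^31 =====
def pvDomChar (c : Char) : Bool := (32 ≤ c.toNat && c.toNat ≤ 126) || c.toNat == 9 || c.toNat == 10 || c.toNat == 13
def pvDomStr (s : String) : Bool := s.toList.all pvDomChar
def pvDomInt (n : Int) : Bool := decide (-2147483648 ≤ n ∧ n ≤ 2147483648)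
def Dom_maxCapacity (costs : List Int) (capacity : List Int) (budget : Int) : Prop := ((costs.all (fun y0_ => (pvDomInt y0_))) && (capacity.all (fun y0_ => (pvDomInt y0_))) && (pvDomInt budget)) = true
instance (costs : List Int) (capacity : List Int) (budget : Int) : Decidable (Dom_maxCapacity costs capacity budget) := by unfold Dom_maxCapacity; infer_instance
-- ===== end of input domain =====

-- B replaces A's monotonic stack by a prefix-maximum array + backward two-pointer; alternative decomposition, same return value.

-- ===== PORT A =====
-- Stack kept with its TOP at the list head (Python's stk[-1] = head, append = cons, pop = tail).
-- The while-pop is dropWhile; the stack never empties (bottom (0,0) has cost 0 and cost < budget),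
-- so the headD default (0,0) is unreachable.
def maxCapacityLoop (budget : Int) : List (Int × Int) → List (Int × Int) × Int → List (Int × Int) × Int
  | [], s => s
  | (cost, cap) :: t, (stk, res) =>
      let stk := stk.dropWhile (fun e => budget ≤ cost + e.1)
      let top := stk.headD (0, 0)
      let res := max res (top.2 + cap)
      let stk := if top.2 < cap then (cost, cap) :: stk else stk
      maxCapacityLoop budget t (stk, res)

def maxCapacity (costs : List Int) (capacity : List Int) (budget : Int) : Int :=
  let a := (costs.zip capacity).filter (fun e => e.1 < budget)
  let a := PySem.List.sorted a (fun x => x.1) false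
  (maxCapacityLoop budget a ([(0, 0)], 0)).2

-- ===== PORT B =====
-- `for _, p in a: pm.append(pm[-1] if pm[-1] >= p else p)`; pm starts [0] so the getLastD default is unreachable
def pmLoop : List (Int × Int) → List Int → List Int
  | [], pm => pm
  | (_, p) :: t, pm => pmLoop t (pm ++ [if p ≤ pm.getLastD 0 then pm.getLastD 0 else p])

-- `while k > 0 and a[k-1][0] + cj >= budget: k -= 1`; k ≤ len(a) throughout, so the getD default is unreachable
def shrinkK (budget cj : Int) (a : List (Int × Int)) : Nat → Nat
  | 0 => 0
  | k + 1 => if budget ≤ (a.getD k (0, 0)).1 + cj then shrinkK budget cj a k else k + 1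

-- `for j, (cj, pj) in enumerate(a): ...`; j is the enumerate counter
def altLoop (budget : Int) (a : List (Int × Int)) (pm : List Int) :
    List (Int × Int) → Nat → Nat → Int → Int
  | [], _, _, res => res
  | (cj, pj) :: t, j, k, res =>
      let k := shrinkK budget cj a k
      let res := max res (pj + pm.getD (if k < j then k else j) 0)
      altLoop budget a pm t (j + 1) k res

def maxCapacity_alt (costs : List Int) (capacity : List Int) (budget : Int) : Int :=
  let a := (costs.zip capacity).filter (fun e => e.1 < budget)
  let a := PySem.List.sorted a (fun x => x.1) false
  let pm := pmLoop a [0]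
  altLoop budget a pm a 0 a.length 0

-- ===== PRECONDITION & SPEC =====
def Spec_maxCapacity (costs : List Int) (capacity : List Int) (budget : Int) (out : Int) : Prop := out = maxCapacity_alt costs capacity budget
instance (costs : List Int) (capacity : List Int) (budget : Int) (out : Int) : Decidable (Spec_maxCapacity costs capacity budget out) := by unfold Spec_maxCapacity; infer_instance

-- ===== CLAIM (what is proved, stated in full; the proofs are below) =====
def Claim_equal_maxCapacity : Prop := ∀ (costs : List Int) (capacity : List Int) (budget : Int), Dom_maxCapacity costs capacity budget → Spec_maxCapacity costs capacity budget (maxCapacity costs capacity budget)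

-- ===== LEMMAS AND PROOFS =====

-- fmax l = best capacity in l (0 if none); maxAff = best capacity among affordable partners in p
def fmax (l : List (Int × Int)) : Int := l.foldl (fun m e => max m e.2) 0

def maxAff (b : Int) (p : List (Int × Int)) (c : Int) : Int :=
  fmax (p.filter (fun e => c + e.1 < b))

-- the common middleman: both loops compute this left fold of "item + best affordable earlier partner"
def specLoop (b : Int) : List (Int × Int) → List (Int × Int) → Int → Int
  | [], _, res => res
  | (cj, pj) :: t, pre, res => specLoop b t (pre ++ [(cj, pj)]) (max res (pj + maxAff b pre cj))

lemma fold_mono_acc (l : List (Int × Int)) : ∀ a b : Int, a ≤ b →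
    l.foldl (fun m e => max m e.2) a ≤ l.foldl (fun m e => max m e.2) b := by
  induction l with
  | nil => intro a b h; simpa using h
  | cons x t ih => intro a b h; exact ih _ _ (by simp; omega)

lemma fold_filter_le (q : Int × Int → Bool) (l : List (Int × Int)) : ∀ a : Int,
    (l.filter q).foldl (fun m e => max m e.2) a ≤ l.foldl (fun m e => max m e.2) a := by
  induction l with
  | nil => intro a; simp
  | cons x t ih =>
    intro a
    by_cases hq : q x
    · simp [hq]; exact ih _
    · simp [hq]
      exact le_trans (ih a) (fold_mono_acc t _ _ (le_max_left _ _))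

lemma maxAff_anti (b : Int) (p : List (Int × Int)) {c c' : Int} (h : c' ≤ c) :
    maxAff b p c ≤ maxAff b p c' := by
  unfold maxAff fmax
  have hf : p.filter (fun e => c + e.1 < b)
      = (p.filter (fun e => c' + e.1 < b)).filter (fun e => c + e.1 < b) := by
    rw [List.filter_filter]
    apply List.filter_congr
    intro e _
    by_cases hc : c + e.1 < b
    · have : c' + e.1 < b := by omega
      simp [hc, this]
    · simp [hc]
  rw [hf]
  exact fold_filter_le _ _ 0

lemma maxAff_le_of_all (b : Int) (p : List (Int × Int)) {cj c : Int}
    (hple : ∀ e ∈ p, e.1 ≤ cj) (hcb : cj + c < b) :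
    maxAff b p cj ≤ maxAff b p c := by
  unfold maxAff fmax
  have hf : p.filter (fun e => c + e.1 < b) = p := by
    apply List.filter_eq_self.mpr
    intro e he
    have := hple e he
    simp; omega
  rw [hf]
  exact fold_filter_le _ _ 0

lemma maxAff_append (b : Int) (p : List (Int × Int)) (c cj pj : Int) :
    maxAff b (p ++ [(cj, pj)]) c
      = if c + cj < b then max (maxAff b p c) pj else maxAff b p c := by
  unfold maxAff fmax
  by_cases hc : c + cj < b
  · simp [List.filter_append, hc, List.foldl_append]
  · simp [List.filter_append, hc]

lemma dropWhile_dropWhile {α : Type} (q1 q2 : α → Bool) (h : ∀ a, q1 a = true → q2 a = true)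
    (l : List α) : (l.dropWhile q1).dropWhile q2 = l.dropWhile q2 := by
  induction l with
  | nil => simp
  | cons x t ih =>
    by_cases h1 : q1 x
    · rw [List.dropWhile_cons_of_pos h1, ih, List.dropWhile_cons_of_pos (h x h1)]
    · rw [List.dropWhile_cons_of_neg (by simp [h1])]

-- loop invariant for A's stack: for any admissible future cost, the post-pop top's capacity
-- is the best affordable partner capacity among the processed prefix p
def StkInv (b : Int) (stk p : List (Int × Int)) : Prop :=
  ∀ c : Int, (∀ e ∈ p, e.1 ≤ c) → c < b →
    ((stk.dropWhile (fun e => b ≤ c + e.1)).headD (0, 0)).2 = maxAff b p c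

lemma inv_base (b : Int) : StkInv b [(0, 0)] [] := by
  intro c _ hcb
  have hd : ¬ b ≤ c := by omega
  simp [List.dropWhile, hd, maxAff, fmax]

lemma step_inv (b : Int) (stk p : List (Int × Int)) (cj pj : Int)
    (hStkInv : StkInv b stk p) (hple : ∀ e ∈ p, e.1 ≤ cj) (hcb : cj < b) :
    StkInv b
      (if ((stk.dropWhile (fun e => b ≤ cj + e.1)).headD (0, 0)).2 < pj
        then (cj, pj) :: stk.dropWhile (fun e => b ≤ cj + e.1)
        else stk.dropWhile (fun e => b ≤ cj + e.1))
      (p ++ [(cj, pj)]) := by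
  intro c hc hcb'
  have hcjc : cj ≤ c := hc (cj, pj) (by simp)
  have hcp : ∀ e ∈ p, e.1 ≤ c := fun e he => le_trans (hple e he) hcjc
  have htop : ((stk.dropWhile (fun e => b ≤ cj + e.1)).headD (0, 0)).2 = maxAff b p cj :=
    hStkInv cj hple hcb
  have hcollapse :
      ((stk.dropWhile (fun e => b ≤ cj + e.1)).dropWhile (fun e => b ≤ c + e.1))
        = stk.dropWhile (fun e => b ≤ c + e.1) := by
    apply dropWhile_dropWhile
    intro e he
    simp at he ⊢
    omega
  rw [maxAff_append]
  by_cases hpush : ((stk.dropWhile (fun e => b ≤ cj + e.1)).headD (0, 0)).2 < pj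
  · rw [if_pos hpush]
    by_cases hacc : c + cj < b
    · rw [List.dropWhile_cons_of_neg (by simp; omega), if_pos hacc]
      have h1 : maxAff b p c ≤ maxAff b p cj := maxAff_anti b p hcjc
      simp
      omega
    · rw [List.dropWhile_cons_of_pos (by simp; omega), if_neg hacc, hcollapse]
      exact hStkInv c hcp hcb'
  · rw [if_neg hpush, hcollapse]
    have hbase : ((stk.dropWhile (fun e => b ≤ c + e.1)).headD (0, 0)).2 = maxAff b p c :=
      hStkInv c hcp hcb'
    by_cases hacc : c + cj < b
    · rw [if_pos hacc, hbase]
      have h2 : maxAff b p cj ≤ maxAff b p c :=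
        maxAff_le_of_all b p hple (by omega)
      omega
    · rw [if_neg hacc]; exact hbase

lemma loop_eq (b : Int) : ∀ (rest p stk : List (Int × Int)) (res : Int),
    StkInv b stk p → (∀ e ∈ p, ∀ f ∈ rest, e.1 ≤ f.1) →
    rest.Pairwise (fun e f => e.1 ≤ f.1) → (∀ f ∈ rest, f.1 < b) →
    (maxCapacityLoop b rest (stk, res)).2 = specLoop b rest p res := by
  intro rest
  induction rest with
  | nil => intro p stk res _ _ _ _; rfl
  | cons x t ih =>
    intro p stk res hStkInv hcross hrpw hrb
    obtain ⟨cj, pj⟩ := x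
    rw [List.pairwise_cons] at hrpw
    have hple : ∀ e ∈ p, e.1 ≤ cj := fun e he => hcross e he (cj, pj) (by simp)
    have hcb : cj < b := hrb (cj, pj) (by simp)
    have htop : ((stk.dropWhile (fun e => b ≤ cj + e.1)).headD (0, 0)).2 = maxAff b p cj :=
      hStkInv cj hple hcb
    show (maxCapacityLoop b t _).2 = specLoop b t _ _
    rw [htop]
    have hres : max res (maxAff b p cj + pj) = max res (pj + maxAff b p cj) := by omega
    rw [hres]
    apply ih
    · have := step_inv b stk p cj pj hStkInv hple hcb
      rwa [htop] at this
    · intro e he f hf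
      rcases List.mem_append.mp he with he' | he'
      · exact hcross e he' f (by simp [hf])
      · simp at he'; subst he'
        exact hrpw.1 f hf
    · exact hrpw.2
    · intro f hf; exact hrb f (by simp [hf])

-- ===== B-side lemmas =====

-- prefix maxima, as a structural recursion (proof-side mirror of pmLoop)
def pmAux (m : Int) : List (Int × Int) → List Int
  | [] => [m]
  | x :: t => m :: pmAux (if x.2 ≤ m then m else x.2) t

lemma pmLoop_eq_pmAux : ∀ (t : List (Int × Int)) (pm0 : List Int) (m : Int),
    pmLoop t (pm0 ++ [m]) = pm0 ++ pmAux m t := by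
  intro t
  induction t with
  | nil => intro pm0 m; simp [pmLoop, pmAux]
  | cons x t ih =>
    intro pm0 m
    obtain ⟨c, p⟩ := x
    have hlast : (pm0 ++ [m]).getLastD 0 = m := by
      simp
    show pmLoop t ((pm0 ++ [m]) ++ [_]) = _
    rw [hlast, ih (pm0 ++ [m]) _]
    simp [pmAux]

lemma pmAux_getD : ∀ (t : List (Int × Int)) (i : Nat) (m : Int), i ≤ t.length →
    (pmAux m t).getD i 0 = (t.take i).foldl (fun acc e => max acc e.2) m := by
  intro t
  induction t with
  | nil =>
    intro i m hi
    simp only [List.length_nil, Nat.le_zero] at hi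
    subst hi
    simp [pmAux]
  | cons x t ih =>
    intro i m hi
    cases i with
    | zero => simp [pmAux]
    | succ i =>
      have hm : (if x.2 ≤ m then m else x.2) = max m x.2 := by
        split_ifs <;> omega
      simp only [pmAux, List.getD_cons_succ, List.take_succ_cons, List.foldl_cons]
      rw [ih i _ (by simpa using hi), hm]

lemma pm_getD (a : List (Int × Int)) (i : Nat) (hi : i ≤ a.length) :
    (pmLoop a [0]).getD i 0 = fmax (a.take i) := by
  have h := pmLoop_eq_pmAux a [] 0
  simp at h
  rw [h]
  exact pmAux_getD a i 0 hi

lemma shrink_le (b cj : Int) (a : List (Int × Int)) : ∀ k, shrinkK b cj a k ≤ k := by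
  intro k
  induction k with
  | zero => simp [shrinkK]
  | succ k ih =>
    simp only [shrinkK]
    split
    · omega
    · omega

lemma shrink_high (b cj : Int) (a : List (Int × Int)) :
    ∀ k, (∀ i (_ : i < a.length), k ≤ i → b ≤ a[i].1 + cj) →
    ∀ i (_ : i < a.length), shrinkK b cj a k ≤ i → b ≤ a[i].1 + cj := by
  intro k
  induction k with
  | zero => intro h i hi _; exact h i hi (Nat.zero_le i)
  | succ k ih =>
    intro h i hi hki
    simp only [shrinkK] at hki
    split at hki
    · next hcond =>
      apply ih _ i hi hki
      intro i' hi' hk'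
      rcases Nat.eq_or_lt_of_le hk' with he | hl
      · subst he
        rwa [List.getD_eq_getElem _ _ hi'] at hcond
      · exact h i' hi' hl
    · exact h i hi hki

lemma shrink_last (b cj : Int) (a : List (Int × Int)) :
    ∀ k k', shrinkK b cj a k = k' + 1 → ¬ b ≤ (a.getD k' (0, 0)).1 + cj := by
  intro k
  induction k with
  | zero => intro k' h; simp [shrinkK] at h
  | succ k ih =>
    intro k' h
    simp only [shrinkK] at h
    split at h
    · exact ih k' h
    · next hcond => 
      have : k = k' := by omega
      subst this
      exact hcond

lemma pairwise_fst_getElem (a : List (Int × Int))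
    (hs : a.Pairwise (fun e f => e.1 ≤ f.1)) {i j : Nat} (hij : i ≤ j) (hj : j < a.length) :
    a[i].1 ≤ a[j].1 := by
  rcases Nat.eq_or_lt_of_le hij with he | hl
  · subst he; exact le_refl _
  · exact List.pairwise_iff_getElem.mp hs i j (lt_of_lt_of_le hl (Nat.le_of_lt hj)) hj hl

-- a filter whose truth is exactly "index below k" is a take
lemma filter_eq_take (q : Int × Int → Bool) : ∀ (l : List (Int × Int)) (k : Nat),
    k ≤ l.length → (∀ i (h : i < l.length), q l[i] = true ↔ i < k) →
    l.filter q = l.take k := by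
  intro l
  induction l with
  | nil => intro k hk _; simp at hk; simp [hk]
  | cons x t ih =>
    intro k hk hq
    cases k with
    | zero =>
      have : t.filter q = [] := by
        apply List.filter_eq_nil_iff.mpr
        intro e he
        obtain ⟨i, hi, he'⟩ := List.getElem_of_mem he
        subst he'
        intro hqe
        have := (hq (i + 1) (by simpa using Nat.succ_lt_succ hi)).mp (by simpa using hqe)
        omega
      have hx : ¬ q x = true := by
        intro hqx
        have := (hq 0 (by simp)).mp (by simpa using hqx)
        omega
      simp [hx, this]
    | succ k =>
      have hx : q x = true := (hq 0 (by simp)).mpr (Nat.succ_pos k)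
      rw [List.take_succ_cons, List.filter_cons, if_pos hx]
      congr 1
      apply ih k (by simpa using hk)
      intro i hi
      have := hq (i + 1) (by simpa using Nat.succ_lt_succ hi)
      simpa using this

lemma alt_eq (b : Int) (a : List (Int × Int)) (hsort : a.Pairwise (fun e f => e.1 ≤ f.1)) :
    ∀ (rest pre : List (Int × Int)) (k : Nat) (res : Int),
    a = pre ++ rest → k ≤ a.length →
    (∀ f ∈ rest, ∀ i (_ : i < a.length), k ≤ i → b ≤ a[i].1 + f.1) →
    altLoop b a (pmLoop a [0]) rest pre.length k res = specLoop b rest pre res := by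
  intro rest
  induction rest with
  | nil => intro pre k res _ _ _; rfl
  | cons x t ih =>
    intro pre k res ha hk hhigh
    obtain ⟨cj, pj⟩ := x
    have hrest_pw : ((cj, pj) :: t).Pairwise (fun e f => e.1 ≤ f.1) :=
      (List.pairwise_append.mp (ha ▸ hsort)).2.1
    rw [List.pairwise_cons] at hrest_pw
    set k' := shrinkK b cj a k with hk'
    have hk'le : k' ≤ k := shrink_le b cj a k
    have hk'len : k' ≤ a.length := le_trans hk'le hk
    -- all indices ≥ k' are unaffordable partners of cj
    have hhi : ∀ i (_ : i < a.length), k' ≤ i → b ≤ a[i].1 + cj :=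
      shrink_high b cj a k (hhigh (cj, pj) (by simp))
    -- all indices < k' are affordable partners of cj
    have hlo : ∀ i (_ : i < a.length), i < k' → a[i].1 + cj < b := by
      intro i hi hik
      cases hkk : k' with
      | zero => omega
      | succ k'' =>
        have hlast := shrink_last b cj a k k'' (hk' ▸ hkk ▸ rfl)
        have hk''lt : k'' < a.length := by omega
        rw [List.getD_eq_getElem _ _ hk''lt] at hlast
        have hmono : a[i].1 ≤ a[k''].1 := pairwise_fst_getElem a hsort (by omega) hk''lt
        omega
    have hjlen : pre.length ≤ a.length := by
      rw [ha]; simp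
    set j := pre.length with hj
    have hifmin : (if k' < j then k' else j) = min k' j := by split <;> omega
    have hmlen : min k' j ≤ a.length := le_trans (Nat.min_le_right _ _) hjlen
    have hpre : pre = a.take j := by rw [ha, hj, List.take_left]
    -- the prefix-max lookup equals the best affordable partner in pre
    have hmaxAff : maxAff b pre cj = fmax (a.take (min k' j)) := by
      have hfilter : pre.filter (fun e => cj + e.1 < b) = pre.take (min k' j) := by
        apply filter_eq_take
        · rw [hpre, List.length_take]; omega
        · intro i hi
          have hij : i < j := by omega
          have hilen : i < a.length := by omega
          have hgete : pre[i] = a[i] := by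
            have h2 : a[i]? = pre[i]? := by
              rw [ha, List.getElem?_append_left hi]
            rw [List.getElem?_eq_getElem hilen, List.getElem?_eq_getElem hi] at h2
            exact (Option.some_inj.mp h2).symm
          rw [hgete]
          simp only [decide_eq_true_eq]
          constructor
          · intro haff
            by_contra hc
            rw [Nat.not_lt] at hc
            have h1 : k' ≤ i := by omega
            have := hhi i hilen h1
            omega
          · intro him
            have h1 : i < k' := by omega
            have := hlo i hilen h1
            omega
      rw [maxAff, hfilter, hpre, List.take_take, Nat.min_eq_left (Nat.min_le_right k' j)]
    have hgetpm : (pmLoop a [0]).getD (min k' j) 0 = fmax (a.take (min k' j)) :=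
      pm_getD a (min k' j) hmlen
    show altLoop b a _ t (j + 1) k'
        (max res (pj + (pmLoop a [0]).getD (if k' < j then k' else j) 0)) = _
    rw [hifmin, hgetpm, ← hmaxAff]
    have hlen1 : j + 1 = (pre ++ [(cj, pj)]).length := by simp [hj]
    rw [hlen1]
    apply ih (pre ++ [(cj, pj)]) k' _ (by rw [ha]; simp) hk'len
    intro f hf i hi hk'i
    have hcjf : cj ≤ f.1 := hrest_pw.1 f hf
    have := hhi i hi hk'i
    omega

-- ===== VERDICT (by name: the statement is the Claim_ definition above) =====
theorem maxCapacity_spec : Claim_equal_maxCapacity := by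
  intro costs capacity budget _
  unfold Spec_maxCapacity maxCapacity maxCapacity_alt
  set a := PySem.List.sorted ((costs.zip capacity).filter (fun e => e.1 < budget)) (fun x => x.1) false with ha
  have hsort : a.Pairwise (fun e f => e.1 ≤ f.1) := PySem.List.sorted_pairwise _ _
  have hA : (maxCapacityLoop budget a ([(0, 0)], 0)).2 = specLoop budget a [] 0 := by
    apply loop_eq
    · exact inv_base budget
    · intro e he; simp at he
    · exact hsort
    · intro f hf
      have : f ∈ (costs.zip capacity).filter (fun e => e.1 < budget) :=
        (PySem.List.mem_sorted _ _ _ _).mp hf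
      have := List.of_mem_filter this
      simpa using this
  have hB : altLoop budget a (pmLoop a [0]) a 0 a.length 0 = specLoop budget a [] 0 := by
    have := alt_eq budget a hsort a [] a.length 0 (by simp) (le_refl _)
      (by intro f _ i hi hki; omega)
    simpa using this
  rw [hA, ← hB]
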